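-- pv_equiv track=rewrite | github.com/peopleatkorea-droid/project_K-ERA | scripts/run_current_model_suite.py | summarize_dataset
-- ===== SOURCE A (Python) =====
-- from typing import Any
--
-- def summarize_dataset(manifest_records: list[dict[str, Any]]) -> dict[str, Any]:
--     patients = sorted({str(record["patient_id"]) for record in manifest_records})
--     visits = {(str(record["patient_id"]), str(record["visit_date"])) for record in manifest_records}
--     return {
--         "n_images": len(manifest_records),
--         "n_patients": len(patients),
--         "n_visits": len(visits),
--     }
-- ===== SOURCE B (Python) =====
-- def summarize_dataset(manifest_records):
--     groups = {}
--     for record in manifest_records: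
--         groups.setdefault(str(record["patient_id"]), set()).add(str(record["visit_date"]))
--     return {
--         "n_images": len(manifest_records),
--         "n_patients": len(groups),
--         "n_visits": sum(len(v) for v in groups.values()),
--     }
-- ===== Notes on version B (the rewrite author's own statement) =====
-- stated objective: alternative
-- what changed: Instead of building two flat sets (patients, patient-visit pairs) as A does, B makes one pass building a dict grouping each patient to its set of visit dates, then reads n_patients as the dict size and n_visits as the sum of per-patient distinct-visit counts.
import Mathlib
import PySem

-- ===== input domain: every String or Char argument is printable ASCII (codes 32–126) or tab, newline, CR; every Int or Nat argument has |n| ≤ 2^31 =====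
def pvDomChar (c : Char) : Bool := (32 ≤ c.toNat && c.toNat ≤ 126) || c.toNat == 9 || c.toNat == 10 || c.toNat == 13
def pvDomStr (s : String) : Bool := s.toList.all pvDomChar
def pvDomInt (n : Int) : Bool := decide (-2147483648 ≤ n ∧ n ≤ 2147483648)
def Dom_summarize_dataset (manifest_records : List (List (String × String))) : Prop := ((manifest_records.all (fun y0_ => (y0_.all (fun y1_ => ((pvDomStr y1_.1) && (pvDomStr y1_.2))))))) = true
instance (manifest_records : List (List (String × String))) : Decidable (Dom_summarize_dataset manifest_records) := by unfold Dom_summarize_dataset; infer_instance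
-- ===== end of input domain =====

-- B groups records into a dict patient -> set of visit dates in one pass and derives the counts
-- from it, instead of A's two flat sets; an alternative decomposition of the same O(n) summary.


-- ===== PORT A =====
-- record[key] for a str-valued record; exact wherever the key is present (Pre_ guarantees it)
def pvField (record : List (String × String)) (key : String) : String :=
  (PySem.Dict.mk record).getD key ""

def summarize_dataset (manifest_records : List (List (String × String))) : List (String × Int) :=
  let patients := PySem.List.sorted (PySem.Set.ofList (manifest_records.map (fun r => pvField r "patient_id"))) (fun x => x) false
  let visits := PySem.Set.ofList (manifest_records.map (fun r => (pvField r "patient_id", pvField r "visit_date")))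
  [("n_images", (manifest_records.length : Int)),
   ("n_patients", (patients.length : Int)),
   ("n_visits", (visits.length : Int))]

-- ===== PORT B =====
def summarize_dataset_alt (manifest_records : List (List (String × String))) : List (String × Int) :=
  let groups : PySem.Dict String (PySem.Set String) :=
    manifest_records.foldl
      (fun d r => d.modify (pvField r "patient_id") PySem.Set.empty (fun s => s.add (pvField r "visit_date")))
      (PySem.Dict.mk [])
  [("n_images", (manifest_records.length : Int)),
   ("n_patients", ((PySem.Dict.size groups : Nat) : Int)),
   ("n_visits", (groups.values.map PySem.Set.len).sum)]

-- ===== PRECONDITION & SPEC =====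
-- Pre_ excludes exactly the records missing a "patient_id" or "visit_date" key, on which Python A raises KeyError.
def Pre_summarize_dataset (manifest_records : List (List (String × String))) : Prop :=
  (manifest_records.all (fun r => (PySem.Dict.mk r).contains "patient_id" && (PySem.Dict.mk r).contains "visit_date")) = true
instance (manifest_records : List (List (String × String))) : Decidable (Pre_summarize_dataset manifest_records) := by unfold Pre_summarize_dataset; infer_instance

def pvWitness_summarize_dataset : (List (List (String × String))) :=
  [[("patient_id", "p1"), ("visit_date", "2024-01-01")], [("patient_id", "p1"), ("visit_date", "2024-02-02")]]

def Spec_summarize_dataset (manifest_records : List (List (String × String))) (out : List (String × Int)) : Prop := out = summarize_dataset_alt manifest_records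
instance (manifest_records : List (List (String × String))) (out : List (String × Int)) : Decidable (Spec_summarize_dataset manifest_records out) := by unfold Spec_summarize_dataset; infer_instance

-- ===== CLAIM (what is proved, stated in full; the proofs are below) =====
def Claim_equal_summarize_dataset : Prop := ∀ (manifest_records : List (List (String × String))), Dom_summarize_dataset manifest_records → Pre_summarize_dataset manifest_records → Spec_summarize_dataset manifest_records (summarize_dataset manifest_records)

-- ===== LEMMAS AND PROOFS =====

-- the (patient, visit) pair a record contributes
def pvPair (r : List (String × String)) : String × String := (pvField r "patient_id", pvField r "visit_date")

-- B's loop step, on the pair level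
def pvStep (d : PySem.Dict String (PySem.Set String)) (x : String × String) : PySem.Dict String (PySem.Set String) :=
  d.modify x.1 PySem.Set.empty (fun s => s.add x.2)

-- canonical form of the dict B builds from the pair list ps
def pvKeys (ps : List (String × String)) : List String := PySem.Set.ofList (ps.map (fun q => q.1))
def pvVal (ps : List (String × String)) (p : String) : PySem.Set String :=
  PySem.Set.ofList ((ps.filter (fun q => q.1 == p)).map (fun q => q.2))
def pvCanon (ps : List (String × String)) : List (String × PySem.Set String) :=
  (pvKeys ps).map (fun p => (p, pvVal ps p))

theorem pv_ofList_append_singleton {α : Type} [BEq α] (l : List α) (a : α) :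
    PySem.Set.ofList (l ++ [a]) = PySem.Set.add (PySem.Set.ofList l) a := by
  simp [PySem.Set.ofList_eq_foldl]

theorem pv_add_of_mem {α : Type} [BEq α] [LawfulBEq α] (s : PySem.Set α) (a : α) (h : a ∈ s) :
    s.add a = s := by
  simp [PySem.Set.add, PySem.Set.contains, h]

theorem pv_add_of_not_mem {α : Type} [BEq α] [LawfulBEq α] (s : PySem.Set α) (a : α) (h : a ∉ s) :
    s.add a = s ++ [a] := by
  simp [PySem.Set.add, PySem.Set.contains, h]

theorem pv_length_add {α : Type} [BEq α] [LawfulBEq α] (s : PySem.Set α) (a : α) :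
    ((s.add a).length : Int) = s.length + (if a ∈ s then 0 else 1) := by
  by_cases h : a ∈ s
  · simp [h]
  · simp [h]

theorem pv_find?_pair_of_mem {ν : Type} (K : List String) (f : String → ν) (a : String) (h : a ∈ K) :
    List.find? (fun q => q.1 == a) (K.map (fun p => (p, f p))) = some (a, f a) := by
  induction K with
  | nil => cases h
  | cons p K ih =>
    by_cases hp : p = a
    · subst hp; simp
    · have : a ∈ K := by cases h with
        | head => exact absurd rfl hp
        | tail _ h' => exact h'
      simp [hp, ih this]

theorem pv_getD_canon (ps : List (String × String)) (a : String) :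
    (PySem.Dict.mk (pvCanon ps)).getD a [] = if a ∈ pvKeys ps then pvVal ps a else [] := by
  by_cases h : a ∈ pvKeys ps
  · simp [PySem.Dict.getD, PySem.Dict.get?, pvCanon, pv_find?_pair_of_mem _ _ _ h, h]
  · have : List.find? (fun q => q.1 == a) (pvCanon ps) = none := by
      apply List.find?_eq_none.2
      intro x hx
      simp only [pvCanon, List.mem_map] at hx
      obtain ⟨p, hp, rfl⟩ := hx
      intro hpa; exact h ((eq_of_beq hpa) ▸ hp)
    simp [PySem.Dict.getD, PySem.Dict.get?, this, h]

theorem pv_contains_canon (ps : List (String × String)) (a : String) :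
    (PySem.Dict.mk (pvCanon ps)).contains a = decide (a ∈ pvKeys ps) := by
  rw [Bool.eq_iff_iff]
  simp [PySem.Dict.contains, pvCanon, List.any_map, Function.comp_def, List.any_eq_true]

theorem pv_keys_append_mem (ps : List (String × String)) (x : String × String)
    (h : x.1 ∈ ps.map (fun q => q.1)) : pvKeys (ps ++ [x]) = pvKeys ps := by
  have hm : x.1 ∈ PySem.Set.ofList (ps.map (fun q => q.1)) := (PySem.Set.mem_ofList _ _).2 h
  unfold pvKeys
  rw [List.map_append, List.map_cons, List.map_nil, pv_ofList_append_singleton,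
    pv_add_of_mem _ _ hm]

theorem pv_keys_append_not_mem (ps : List (String × String)) (x : String × String)
    (h : x.1 ∉ ps.map (fun q => q.1)) : pvKeys (ps ++ [x]) = pvKeys ps ++ [x.1] := by
  have hm : x.1 ∉ PySem.Set.ofList (ps.map (fun q => q.1)) := fun hc => h ((PySem.Set.mem_ofList _ _).1 hc)
  unfold pvKeys
  rw [List.map_append, List.map_cons, List.map_nil, pv_ofList_append_singleton,
    pv_add_of_not_mem _ _ hm]

theorem pv_val_append_self (ps : List (String × String)) (x : String × String) :
    pvVal (ps ++ [x]) x.1 = (pvVal ps x.1).add x.2 := by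
  simp [pvVal, List.filter_append, pv_ofList_append_singleton]

theorem pv_val_append_ne (ps : List (String × String)) (x : String × String) (p : String)
    (h : p ≠ x.1) : pvVal (ps ++ [x]) p = pvVal ps p := by
  simp [pvVal, List.filter_append, List.filter, beq_eq_false_iff_ne.2 (Ne.symm h)]

theorem pv_canon_append_mem (ps : List (String × String)) (x : String × String)
    (h : x.1 ∈ ps.map (fun q => q.1)) :
    pvCanon (ps ++ [x]) =
      (pvKeys ps).map (fun p => (p, if p = x.1 then (pvVal ps p).add x.2 else pvVal ps p)) := by
  simp only [pvCanon, pv_keys_append_mem ps x h]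
  apply List.map_congr_left
  intro p _
  by_cases hp : p = x.1
  · subst hp; simp [pv_val_append_self]
  · simp [hp, pv_val_append_ne ps x p hp]

theorem pv_canon_append_not_mem (ps : List (String × String)) (x : String × String)
    (h : x.1 ∉ ps.map (fun q => q.1)) :
    pvCanon (ps ++ [x]) = pvCanon ps ++ [(x.1, [x.2])] := by
  have hfil : ps.filter (fun q => q.1 == x.1) = [] := by
    apply List.filter_eq_nil_iff.2
    intro q hq hc
    apply h
    rw [← eq_of_beq hc]
    exact List.mem_map_of_mem hq
  simp only [pvCanon, pv_keys_append_not_mem ps x h, List.map_append, List.map_cons, List.map_nil]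
  congr 1
  · apply List.map_congr_left
    intro p hp
    have hpm : p ∈ ps.map (fun q => q.1) := (PySem.Set.mem_ofList _ _).1 hp
    have hne : p ≠ x.1 := fun hc => h (hc ▸ hpm)
    simp [pv_val_append_ne ps x p hne]
  · rw [pv_val_append_self]
    simp [pvVal, hfil, PySem.Set.ofList, PySem.Set.add, PySem.Set.contains, PySem.Set.empty]

theorem pv_foldl_eq_canon (ps : List (String × String)) :
    ps.foldl pvStep (PySem.Dict.mk []) = PySem.Dict.mk (pvCanon ps) := by
  induction ps using List.reverseRecOn with
  | nil => simp [pvCanon, pvKeys, PySem.Set.ofList]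
  | append_singleton ps x ih =>
    rw [List.foldl_append, List.foldl_cons, List.foldl_nil, ih]
    by_cases h : x.1 ∈ ps.map (fun q => q.1)
    · have hk : x.1 ∈ pvKeys ps := (PySem.Set.mem_ofList _ _).2 h
      simp only [pvStep, PySem.Dict.modify, PySem.Dict.insert, pv_contains_canon, hk,
        decide_true, if_true, pv_getD_canon, PySem.Set.empty]
      rw [pv_canon_append_mem ps x h]
      simp only [pvCanon, List.map_map]
      apply congrArg
      apply List.map_congr_left
      intro p hp
      by_cases hpx : p = x.1
      · subst hpx; simp
      · simp [hpx]
    · have hk : x.1 ∉ pvKeys ps := fun hc => h ((PySem.Set.mem_ofList _ _).1 hc)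
      simp only [pvStep, PySem.Dict.modify, PySem.Dict.insert, pv_contains_canon, hk,
        decide_false, Bool.false_eq_true, if_false, pv_getD_canon, PySem.Set.empty]
      rw [pv_canon_append_not_mem ps x h]
      simp [PySem.Set.add, PySem.Set.contains]

theorem pv_sum_update (K : List String) (hK : K.Nodup) (f : String → Int) (a : String) (m : Int)
    (ha : a ∈ K) :
    ((K.map (fun p => if p = a then m else f p)).sum) = (K.map f).sum - f a + m := by
  induction K with
  | nil => cases ha
  | cons p K ih =>
    rcases List.nodup_cons.1 hK with ⟨hpK, hK'⟩
    by_cases hp : p = a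
    · subst hp
      have : K.map (fun q => if q = p then m else f q) = K.map f := by
        apply List.map_congr_left
        intro q hq
        have : q ≠ p := fun hc => hpK (hc ▸ hq)
        simp [this]
      simp [this]
      ring
    · have ha' : a ∈ K := by cases ha with
        | head => exact absurd rfl hp
        | tail _ h' => exact h'
      simp only [List.map_cons, List.sum_cons, ih hK' ha', if_neg hp]
      ring

theorem pv_mem_val_iff (ps : List (String × String)) (x : String × String) :
    x.2 ∈ pvVal ps x.1 ↔ x ∈ ps := by
  simp only [pvVal, PySem.Set.mem_ofList, List.mem_map, List.mem_filter, beq_iff_eq]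
  constructor
  · rintro ⟨q, ⟨hq, h1⟩, h2⟩
    have : q = x := Prod.ext h1 h2
    exact this ▸ hq
  · intro h; exact ⟨x, ⟨h, rfl⟩, rfl⟩

theorem pv_length_ofList_append (ps : List (String × String)) (x : String × String) :
    ((PySem.Set.ofList (ps ++ [x])).length : Int) =
      (PySem.Set.ofList ps).length + (if x ∈ ps then 0 else 1) := by
  rw [pv_ofList_append_singleton]
  rw [pv_length_add]
  simp [PySem.Set.mem_ofList]

theorem pv_sum_canon (ps : List (String × String)) :
    ((pvCanon ps).map (fun kv => PySem.Set.len kv.2)).sum = ((PySem.Set.ofList ps).length : Int) := by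
  induction ps using List.reverseRecOn with
  | nil => simp [pvCanon, pvKeys, PySem.Set.ofList]
  | append_singleton ps x ih =>
    rw [pv_length_ofList_append]
    by_cases h : x.1 ∈ ps.map (fun q => q.1)
    · have hk : x.1 ∈ pvKeys ps := (PySem.Set.mem_ofList _ _).2 h
      rw [pv_canon_append_mem ps x h]
      rw [List.map_map]
      have : ((fun kv : String × PySem.Set String => PySem.Set.len kv.2) ∘
          (fun p => (p, if p = x.1 then (pvVal ps p).add x.2 else pvVal ps p))) =
          (fun p => if p = x.1 then PySem.Set.len ((pvVal ps x.1).add x.2) else PySem.Set.len (pvVal ps p)) := by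
        funext p
        by_cases hp : p = x.1
        · subst hp; simp
        · simp [hp]
      rw [this, pv_sum_update (pvKeys ps) (PySem.Set.nodup_ofList _) _ x.1 _ hk]
      have hlen : PySem.Set.len ((pvVal ps x.1).add x.2) =
          PySem.Set.len (pvVal ps x.1) + (if x.2 ∈ pvVal ps x.1 then 0 else 1) := by
        simp only [PySem.Set.len]
        exact_mod_cast pv_length_add (pvVal ps x.1) x.2
      rw [hlen]
      have hmm : (if x.2 ∈ pvVal ps x.1 then (0:Int) else 1) = (if x ∈ ps then 0 else 1) := by
        by_cases hxp : x ∈ ps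
        · simp [hxp, (pv_mem_val_iff ps x).2 hxp]
        · have : x.2 ∉ pvVal ps x.1 := fun hc => hxp ((pv_mem_val_iff ps x).1 hc)
          simp [hxp, this]
      rw [hmm] at *
      have : ((pvCanon ps).map (fun kv => PySem.Set.len kv.2)).sum =
          ((pvKeys ps).map (fun p => PySem.Set.len (pvVal ps p))).sum := by
        simp [pvCanon, List.map_map, Function.comp_def]
      rw [this] at ih
      omega
    · have hx : x ∉ ps := fun hc => h (List.mem_map_of_mem hc)
      rw [pv_canon_append_not_mem ps x h]
      simp only [List.map_append, List.sum_append, ih, List.map_cons, List.map_nil,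
        List.sum_cons, List.sum_nil]
      simp [PySem.Set.len, hx]

-- ===== VERDICT (by name: the statement is the Claim_ definition above) =====
theorem summarize_dataset_spec : Claim_equal_summarize_dataset := by
  intro ms _ _
  unfold Spec_summarize_dataset summarize_dataset summarize_dataset_alt
  have hfold : ms.foldl
      (fun d r => d.modify (pvField r "patient_id") PySem.Set.empty (fun s => s.add (pvField r "visit_date")))
      (PySem.Dict.mk []) = PySem.Dict.mk (pvCanon (ms.map pvPair)) := by
    rw [← pv_foldl_eq_canon, List.foldl_map]
    rfl
  rw [hfold]
  simp only [PySem.List.length_sorted, List.cons.injEq, Prod.mk.injEq, and_true, true_and]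
  constructor
  · -- n_patients
    simp only [PySem.Dict.size, pvCanon, List.length_map, pvKeys, List.map_map]
    rfl
  · -- n_visits
    have hv : (PySem.Dict.mk (pvCanon (ms.map pvPair))).values = (pvCanon (ms.map pvPair)).map (fun kv => kv.2) := rfl
    rw [hv, List.map_map]
    have := pv_sum_canon (ms.map pvPair)
    simp only [Function.comp_def] at this ⊢
    rw [this]
    rfl
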